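-- pv_equiv track=rewrite | github.com/HackXIt/REIL-hex-game | src/reil_hex_game/agents/rule_based_helper.py | get_adjacency_map
-- ===== SOURCE A (Python) =====
-- from typing import List, Tuple, Dict, Callable, Set, Optional
--
-- Coordinate = Tuple[int, int]
--
-- ADJACENCY_MAPS: Dict[int, Dict[Coordinate, List[Coordinate]]] = {}
--
-- def get_adjacency_map(size: int) -> Dict[Coordinate, List[Coordinate]]:
--     if size in ADJACENCY_MAPS:
--         return ADJACENCY_MAPS[size]
--
--     adjacency = {}
--     for x in range(size):
--         for y in range(size):
--             candidates = [
--                 (x-1, y),     # up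
--                 (x+1, y),     # down
--                 (x, y-1),     # left
--                 (x, y+1),     # right
--                 (x-1, y+1),   # up-right
--                 (x+1, y-1)    # down-left
--             ]
--             adjacency[(x, y)] = [
--                 (i, j) for i, j in candidates
--                 if 0 <= i < size and 0 <= j < size
--             ]
--     ADJACENCY_MAPS[size] = adjacency
--     return adjacency
-- ===== SOURCE B (Python) =====
-- from typing import List, Tuple, Dict
--
-- Coordinate = Tuple[int, int]
--
-- ADJACENCY_MAPS: Dict[int, Dict[Coordinate, List[Coordinate]]] = {}
--
-- # Direction-major, flat-buffer construction: one list slot per cell (row-major),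
-- # then six offset sweeps, each over only the rectangle of cells whose neighbor is
-- # in bounds (no per-cell bounds test, no dict hashing in the hot loop); the
-- # coordinate-keyed dict is assembled once at the end.
-- _OFFSETS = ((-1, 0), (1, 0), (0, -1), (0, 1), (-1, 1), (1, -1))
--
-- def get_adjacency_map(size: int) -> Dict[Coordinate, List[Coordinate]]:
--     if size in ADJACENCY_MAPS:
--         return ADJACENCY_MAPS[size]
--
--     n = max(size, 0)
--     rows = [[] for _ in range(n * n)]
--     for dx, dy in _OFFSETS:
--         x0, x1 = max(0, -dx), min(size, size - dx)
--         y0, y1 = max(0, -dy), min(size, size - dy)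
--         for x in range(x0, x1):
--             base = x * size
--             for y in range(y0, y1):
--                 rows[base + y].append((x + dx, y + dy))
--     adjacency = {(x, y): rows[x * size + y] for x in range(size) for y in range(size)}
--     ADJACENCY_MAPS[size] = adjacency
--     return adjacency
-- ===== Notes on version B (the rewrite author's own statement) =====
-- stated objective: alternative
-- what changed: Replaces A's cell-major single pass (each cell builds its six-candidate list, filters it, and inserts it into the dict) with a direction-major flat-buffer construction: one list slot per cell in a row-major list, six offset sweeps each restricted to the rectangle of cells whose neighbor is in bounds (no per-cell bounds test and no dict hashing in the sweep loops), with the coordinate-keyed dict assembled once at the end.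
import Mathlib
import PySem

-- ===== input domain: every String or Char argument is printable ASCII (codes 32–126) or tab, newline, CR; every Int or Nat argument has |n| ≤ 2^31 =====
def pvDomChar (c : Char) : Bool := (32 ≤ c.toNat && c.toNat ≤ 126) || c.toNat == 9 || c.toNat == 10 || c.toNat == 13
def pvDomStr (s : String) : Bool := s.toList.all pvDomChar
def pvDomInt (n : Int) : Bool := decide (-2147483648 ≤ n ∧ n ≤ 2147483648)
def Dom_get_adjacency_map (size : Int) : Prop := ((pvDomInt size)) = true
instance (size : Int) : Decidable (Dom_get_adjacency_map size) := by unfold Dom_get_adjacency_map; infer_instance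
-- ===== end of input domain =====

-- B rebuilds the same adjacency map direction-major over a flat row-major buffer: one list slot per
-- cell, six offset sweeps each restricted to the rectangle of cells whose neighbor is in bounds
-- (no per-cell bounds test, no dict lookups in the sweep loops), dict assembled once at the end;
-- A is cell-major candidate filtering. Objective: alternative (same asymptotic cost).
-- Both Pythons keep the module-level memo cache; the ports model the pure (cache-miss) value.


-- ===== PORT A =====
-- the literal candidate list [(x-1,y),(x+1,y),(x,y-1),(x,y+1),(x-1,y+1),(x+1,y-1)]
def pvCandidates (x y : Int) : List (Int × Int) :=
  [(x-1, y), (x+1, y), (x, y-1), (x, y+1), (x-1, y+1), (x+1, y-1)]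

def get_adjacency_map (size : Int) : List (Int × Int × List (Int × Int)) :=
  ((PySem.List.pyRange 0 size 1).foldl (fun d x =>
    (PySem.List.pyRange 0 size 1).foldl (fun d y =>
      d.insert (x, y) ((pvCandidates x y).filter
        (fun p => decide (0 ≤ p.1 ∧ p.1 < size ∧ 0 ≤ p.2 ∧ p.2 < size)))) d)
    PySem.Dict.empty).items.map (fun p => (p.1.1, p.1.2, p.2))

-- ===== PORT B =====
def pvOffsets : List (Int × Int) := [(-1, 0), (1, 0), (0, -1), (0, 1), (-1, 1), (1, -1)]

-- the cells (x, y) the final dict comprehension iterates over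
def pvCellsB (size : Int) : List (Int × Int) :=
  (PySem.List.pyRange 0 size 1).flatMap (fun x =>
    (PySem.List.pyRange 0 size 1).map (fun y => (x, y)))

-- the rectangle swept for offset (dx, dy): x in range(max(0,-dx), min(size, size-dx)), same for y
def pvSub (size dx dy : Int) : List (Int × Int) :=
  (PySem.List.pyRange (max 0 (-dx)) (min size (size - dx)) 1).flatMap (fun x =>
    (PySem.List.pyRange (max 0 (-dy)) (min size (size - dy)) 1).map (fun y => (x, y)))

-- n = max(size, 0); rows = [[] for _ in range(n * n)]
def pvRows0 (size : Int) : List (List (Int × Int)) :=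
  (PySem.List.pyRange 0 (max size 0 * max size 0) 1).map (fun _ => [])

-- the body of B's inner loop: rows[base + y].append((x + dx, y + dy)); base + y = x*size + y is
-- nonnegative and in range on the swept rectangle, so the .toNat-indexed set is exact there
def pvStepC (size dx dy : Int) (rows : List (List (Int × Int))) (c : Int × Int) :
    List (List (Int × Int)) :=
  rows.set (c.1 * size + c.2).toNat
    (PySem.List.pyGetD rows (c.1 * size + c.2) [] ++ [(c.1 + dx, c.2 + dy)])

-- one pass of B: sweep one offset over its in-bounds rectangle
def pvPassB (size dx dy : Int) (rows : List (List (Int × Int))) : List (List (Int × Int)) :=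
  (pvSub size dx dy).foldl (pvStepC size dx dy) rows

def get_adjacency_map_alt (size : Int) : List (Int × Int × List (Int × Int)) :=
  (let rows := pvOffsets.foldl (fun rows off => pvPassB size off.1 off.2 rows) (pvRows0 size)
   (pvCellsB size).foldl (fun d c =>
     d.insert c (PySem.List.pyGetD rows (c.1 * size + c.2) []))
     PySem.Dict.empty).items.map (fun p => (p.1.1, p.1.2, p.2))

-- ===== PRECONDITION & SPEC =====
def Spec_get_adjacency_map (size : Int) (out : List (Int × Int × List (Int × Int))) : Prop := out = get_adjacency_map_alt size
instance (size : Int) (out : List (Int × Int × List (Int × Int))) : Decidable (Spec_get_adjacency_map size out) := by unfold Spec_get_adjacency_map; infer_instance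

-- ===== CLAIM (what is proved, stated in full; the proofs are below) =====
def Claim_equal_get_adjacency_map : Prop := ∀ (size : Int), Dom_get_adjacency_map size → Spec_get_adjacency_map size (get_adjacency_map size)

-- ===== LEMMAS AND PROOFS =====

theorem nodup_prodRange (a b a' b' : Int) :
    (((PySem.List.pyRange a b 1).flatMap (fun x =>
      (PySem.List.pyRange a' b' 1).map (fun y => ((x, y) : Int × Int))))).Nodup := by
  apply List.nodup_flatMap.mpr
  refine ⟨fun x _ => ?_, ?_⟩
  · exact (PySem.List.nodup_pyRange_one a' b').map (fun c d h => by simpa using h)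
  · apply List.Pairwise.imp ?_ (PySem.List.pairwise_lt_pyRange_one a b)
    intro c d hcd
    simp only [Function.onFun, List.disjoint_left, List.mem_map]
    rintro p ⟨y, _, rfl⟩ ⟨y', _, h⟩
    exact absurd (congrArg Prod.fst h) (by simp; omega)

theorem mem_prodRange (a b a' b' : Int) (c : Int × Int) :
    c ∈ ((PySem.List.pyRange a b 1).flatMap (fun x =>
      (PySem.List.pyRange a' b' 1).map (fun y => ((x, y) : Int × Int))))
    ↔ (a ≤ c.1 ∧ c.1 < b ∧ a' ≤ c.2 ∧ c.2 < b') := by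
  obtain ⟨x, y⟩ := c
  simp only [List.mem_flatMap, List.mem_map, PySem.List.mem_pyRange_one, Prod.mk.injEq]
  constructor
  · rintro ⟨x', hx', y', hy', rfl, rfl⟩; exact ⟨hx'.1, hx'.2, hy'.1, hy'.2⟩
  · rintro ⟨h1, h2, h3, h4⟩; exact ⟨x, ⟨h1, h2⟩, y, ⟨h3, h4⟩, rfl, rfl⟩

theorem mem_cellsB (size : Int) (c : Int × Int) :
    c ∈ pvCellsB size ↔ (0 ≤ c.1 ∧ c.1 < size ∧ 0 ≤ c.2 ∧ c.2 < size) :=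
  mem_prodRange 0 size 0 size c

theorem mem_pvSub (size dx dy : Int) (c : Int × Int) (h : c ∈ pvCellsB size) :
    (c ∈ pvSub size dx dy)
    ↔ (0 ≤ c.1 + dx ∧ c.1 + dx < size ∧ 0 ≤ c.2 + dy ∧ c.2 + dy < size) := by
  rw [mem_cellsB] at h
  rw [pvSub, mem_prodRange]
  simp only [max_le_iff, lt_min_iff]
  omega

theorem sub_subset_cells (size dx dy : Int) (c : Int × Int) (h : c ∈ pvSub size dx dy) :
    c ∈ pvCellsB size := by
  rw [pvSub, mem_prodRange] at h
  rw [mem_cellsB]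
  simp only [max_le_iff, lt_min_iff] at h
  omega

-- the flat row-major index of a cell
theorem idx_nonneg (size : Int) (c : Int × Int) (h : c ∈ pvCellsB size) :
    0 ≤ c.1 * size + c.2 := by
  rw [mem_cellsB] at h
  have := mul_nonneg h.1 (le_of_lt (lt_of_le_of_lt h.2.2.1 h.2.2.2))
  omega

theorem idx_lt (size : Int) (c : Int × Int) (h : c ∈ pvCellsB size) :
    c.1 * size + c.2 < max size 0 * max size 0 := by
  rw [mem_cellsB] at h
  have hpos : (0 : Int) < size := lt_of_le_of_lt h.1 h.2.1
  rw [max_eq_left (le_of_lt hpos)]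
  nlinarith [h.1, h.2.1, h.2.2.1, h.2.2.2]

theorem idx_inj (size : Int) (c c' : Int × Int) (h : c ∈ pvCellsB size)
    (h' : c' ∈ pvCellsB size) (he : c.1 * size + c.2 = c'.1 * size + c'.2) : c = c' := by
  rw [mem_cellsB] at h h'
  obtain ⟨x, y⟩ := c; obtain ⟨x', y'⟩ := c'
  simp only at h h' he ⊢
  have hx : x = x' := by nlinarith [h.1, h.2.1, h.2.2.1, h.2.2.2, h'.1, h'.2.1, h'.2.2.1, h'.2.2.2]
  subst hx
  have : y = y' := by omega
  simp [this]

-- reading a cell's slot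
theorem read_eq (size : Int) (rows : List (List (Int × Int))) (c : Int × Int)
    (h : c ∈ pvCellsB size) :
    PySem.List.pyGetD rows (c.1 * size + c.2) [] = rows.getD (c.1 * size + c.2).toNat [] :=
  PySem.List.pyGetD_of_nonneg rows [] (idx_nonneg size c h)

theorem length_stepC (size dx dy : Int) (rows : List (List (Int × Int))) (c : Int × Int) :
    (pvStepC size dx dy rows c).length = rows.length := List.length_set

theorem length_fold (size dx dy : Int) (cs : List (Int × Int)) (rows : List (List (Int × Int))) :
    (cs.foldl (pvStepC size dx dy) rows).length = rows.length := by
  induction cs generalizing rows with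
  | nil => rfl
  | cons a cs ih => rw [List.foldl_cons, ih, length_stepC]

theorem stepC_read_ne (size dx dy : Int) (rows : List (List (Int × Int))) (a c : Int × Int)
    (ha : a ∈ pvCellsB size) (hc : c ∈ pvCellsB size) (hne : c ≠ a) :
    PySem.List.pyGetD (pvStepC size dx dy rows a) (c.1 * size + c.2) []
    = PySem.List.pyGetD rows (c.1 * size + c.2) [] := by
  rw [read_eq size _ c hc, read_eq size rows c hc, pvStepC,
    List.getD_eq_getElem?_getD, List.getD_eq_getElem?_getD,
    List.getElem?_set_ne (fun he => hne (idx_inj size c a hc ha ?_))]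
  have h1 := idx_nonneg size a ha
  have h2 := idx_nonneg size c hc
  omega

theorem stepC_read_self (size dx dy : Int) (rows : List (List (Int × Int))) (a : Int × Int)
    (ha : a ∈ pvCellsB size) (hlen : rows.length = (max size 0 * max size 0).toNat) :
    PySem.List.pyGetD (pvStepC size dx dy rows a) (a.1 * size + a.2) []
    = PySem.List.pyGetD rows (a.1 * size + a.2) [] ++ [(a.1 + dx, a.2 + dy)] := by
  have hlt : (a.1 * size + a.2).toNat < rows.length := by
    have := idx_lt size a ha
    have := idx_nonneg size a ha
    omega
  rw [read_eq size _ a ha, pvStepC, List.getD_eq_getElem?_getD, List.getElem?_set]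
  simp [hlt]

theorem fold_read_not_mem (size dx dy : Int) (cs : List (Int × Int))
    (rows : List (List (Int × Int))) (c : Int × Int)
    (hall : ∀ a ∈ cs, a ∈ pvCellsB size) (hc : c ∈ pvCellsB size) (hnm : c ∉ cs) :
    PySem.List.pyGetD (cs.foldl (pvStepC size dx dy) rows) (c.1 * size + c.2) []
    = PySem.List.pyGetD rows (c.1 * size + c.2) [] := by
  induction cs generalizing rows with
  | nil => rfl
  | cons a cs ih =>
    rw [List.foldl_cons, ih _ (fun a' ha' => hall a' (by simp [ha'])) (fun h => hnm (by simp [h])),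
      stepC_read_ne size dx dy rows a c (hall a (by simp)) hc (fun h => hnm (by simp [h]))]

theorem fold_read_mem (size dx dy : Int) (cs : List (Int × Int))
    (rows : List (List (Int × Int))) (c : Int × Int)
    (hall : ∀ a ∈ cs, a ∈ pvCellsB size) (hn : cs.Nodup) (hc : c ∈ cs)
    (hlen : rows.length = (max size 0 * max size 0).toNat) :
    PySem.List.pyGetD (cs.foldl (pvStepC size dx dy) rows) (c.1 * size + c.2) []
    = PySem.List.pyGetD rows (c.1 * size + c.2) [] ++ [(c.1 + dx, c.2 + dy)] := by
  induction cs generalizing rows with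
  | nil => simp at hc
  | cons a cs ih =>
    rcases List.mem_cons.mp hc with rfl | hmem
    · rw [List.foldl_cons,
        fold_read_not_mem size dx dy cs _ c (fun a' ha' => hall a' (by simp [ha']))
          (hall c (by simp)) (List.nodup_cons.mp hn).1,
        stepC_read_self size dx dy rows c (hall c (by simp)) hlen]
    · have hne : c ≠ a := by
        rintro rfl
        exact (List.nodup_cons.mp hn).1 hmem
      rw [List.foldl_cons, ih _ (fun a' ha' => hall a' (by simp [ha'])) (List.nodup_cons.mp hn).2
          hmem (by rw [length_stepC, hlen]),
        stepC_read_ne size dx dy rows a c (hall a (by simp)) (hall c (by simp [hmem])) hne]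

theorem multiRead (size : Int) (offs : List (Int × Int)) (rows : List (List (Int × Int)))
    (c : Int × Int) (hc : c ∈ pvCellsB size) (hlen : rows.length = (max size 0 * max size 0).toNat) :
    PySem.List.pyGetD (offs.foldl (fun rows off => pvPassB size off.1 off.2 rows) rows)
      (c.1 * size + c.2) []
    = PySem.List.pyGetD rows (c.1 * size + c.2) [] ++ offs.flatMap (fun off =>
        if c ∈ pvSub size off.1 off.2 then [(c.1 + off.1, c.2 + off.2)] else []) := by
  induction offs generalizing rows with
  | nil => simp
  | cons o offs ih =>
    have hlen' : (pvPassB size o.1 o.2 rows).length = (max size 0 * max size 0).toNat := by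
      rw [pvPassB, length_fold, hlen]
    rw [List.foldl_cons, ih _ hlen']
    unfold pvPassB
    by_cases hm : c ∈ pvSub size o.1 o.2
    · rw [fold_read_mem size o.1 o.2 _ rows c (fun a ha => sub_subset_cells size o.1 o.2 a ha)
        (by rw [pvSub]; exact nodup_prodRange _ _ _ _) hm hlen]
      simp [List.flatMap_cons, hm]
    · rw [fold_read_not_mem size o.1 o.2 _ rows c
        (fun a ha => sub_subset_cells size o.1 o.2 a ha) hc hm]
      simp [List.flatMap_cons, hm]

theorem read_rows0 (size : Int) (c : Int × Int) (hc : c ∈ pvCellsB size) :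
    PySem.List.pyGetD (pvRows0 size) (c.1 * size + c.2) [] = [] := by
  rw [read_eq size _ c hc, pvRows0, List.getD_eq_getElem?_getD, List.getElem?_map]
  cases (PySem.List.pyRange 0 (max size 0 * max size 0) 1)[(c.1 * size + c.2).toNat]? <;> simp

theorem length_rows0 (size : Int) : (pvRows0 size).length = (max size 0 * max size 0).toNat := by
  rw [pvRows0, List.length_map, PySem.List.length_pyRange_one]
  omega

-- A's nested insertion loop is a fresh-key insertion over pvCellsB size
theorem itemsA (size : Int) :
    ((PySem.List.pyRange 0 size 1).foldl (fun d x =>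
      (PySem.List.pyRange 0 size 1).foldl (fun d y =>
        d.insert (x, y) ((pvCandidates x y).filter
          (fun p => decide (0 ≤ p.1 ∧ p.1 < size ∧ 0 ≤ p.2 ∧ p.2 < size)))) d)
      PySem.Dict.empty).items
    = (pvCellsB size).map (fun c => (c,
        (pvCandidates c.1 c.2).filter
          (fun p => decide (0 ≤ p.1 ∧ p.1 < size ∧ 0 ≤ p.2 ∧ p.2 < size)))) := by
  have h1 : ∀ (x : Int) (d : PySem.Dict (Int × Int) (List (Int × Int))),
      (PySem.List.pyRange 0 size 1).foldl (fun d y =>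
        d.insert (x, y) ((pvCandidates x y).filter
          (fun p => decide (0 ≤ p.1 ∧ p.1 < size ∧ 0 ≤ p.2 ∧ p.2 < size)))) d
      = ((PySem.List.pyRange 0 size 1).map (fun y => ((x, y) : Int × Int))).foldl
          (fun d c => d.insert c ((pvCandidates c.1 c.2).filter
            (fun p => decide (0 ≤ p.1 ∧ p.1 < size ∧ 0 ≤ p.2 ∧ p.2 < size)))) d := by
    intro x d
    rw [List.foldl_map]
  simp only [h1]
  rw [← List.foldl_flatMap]
  rw [show (List.flatMap (fun x => List.map (fun y => ((x, y) : Int × Int)) (PySem.List.pyRange 0 size))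
          (PySem.List.pyRange 0 size)) = pvCellsB size from rfl]
  rw [PySem.Dict.items_foldl_insert_fresh (pvCellsB size) (fun c => c) _ _
    (fun a _ => PySem.Dict.contains_empty a) (by simpa using nodup_prodRange 0 size 0 size)]
  simp [PySem.Dict.empty]

theorem flatMap_eq_filter (size x y : Int) (hx : 0 ≤ x ∧ x < size) (hy : 0 ≤ y ∧ y < size) :
    pvOffsets.flatMap (fun off =>
        if (x, y) ∈ pvSub size off.1 off.2 then [(x + off.1, y + off.2)] else [])
    = (pvCandidates x y).filter
        (fun p => decide (0 ≤ p.1 ∧ p.1 < size ∧ 0 ≤ p.2 ∧ p.2 < size)) := by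
  have hmem : ∀ dx dy : Int, ((x, y) ∈ pvSub size dx dy)
      = (0 ≤ x + dx ∧ x + dx < size ∧ 0 ≤ y + dy ∧ y + dy < size) := by
    intro dx dy
    exact propext (mem_pvSub size dx dy (x, y) ((mem_cellsB size (x, y)).mpr ⟨hx.1, hx.2, hy.1, hy.2⟩))
  simp only [pvOffsets, pvCandidates, List.flatMap_cons, List.flatMap_nil, hmem,
    List.filter_cons, List.filter_nil, decide_eq_true_eq, add_zero, sub_eq_add_neg,
    List.append_nil]
  split_ifs <;> simp

-- ===== VERDICT (by name: the statement is the Claim_ definition above) =====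
theorem get_adjacency_map_spec : Claim_equal_get_adjacency_map := by
  intro size _
  unfold Spec_get_adjacency_map get_adjacency_map get_adjacency_map_alt
  rw [itemsA]
  congr 1
  rw [PySem.Dict.items_foldl_insert_fresh (pvCellsB size) (fun c => c) _ _
    (fun a _ => PySem.Dict.contains_empty a) (by simpa using nodup_prodRange 0 size 0 size)]
  rw [show (PySem.Dict.empty : PySem.Dict (Int × Int) (List (Int × Int))).items = [] from rfl,
    List.nil_append]
  apply List.map_congr_left
  intro c hc
  have hb := (mem_cellsB size c).mp hc
  rw [multiRead size pvOffsets (pvRows0 size) c hc (length_rows0 size), read_rows0 size c hc,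
    List.nil_append, flatMap_eq_filter size c.1 c.2 ⟨hb.1, hb.2.1⟩ ⟨hb.2.2.1, hb.2.2.2⟩]
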